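-- pv_equiv track=rewrite | github.com/smushball27295/sentiment | selenium/opinion_mining_def_black.py | strip_all_entities
-- ===== SOURCE A (Python) =====
-- import string
--
-- def strip_all_entities(text):
--     entity_prefixes = ["@", "#"]
--     for separator in string.punctuation:
--         if separator not in entity_prefixes:
--             text = text.replace(separator, " ")
--     words = []
--     for word in text.split():
--         word = word.strip()
--         if word:
--             if word[0] not in entity_prefixes:
--                 words.append(word)
--     return " ".join(words)
-- ===== SOURCE B (Python) =====
-- import string
--
--
-- def strip_all_entities(text):
--     # One pass over the characters with an explicit word accumulator:
--     # punctuation (except @/#) and whitespace end the current word; a word is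
--     # kept unless its first character was '@' or '#'.  No replace/translate
--     # pre-pass and no split().
--     seps = {c for c in string.punctuation if c not in "@#"}
--     words = []
--     word = []
--     keep = True
--     for ch in text:
--         if ch in seps or ch.isspace():
--             if word and keep:
--                 words.append("".join(word))
--             word = []
--         else:
--             if not word:
--                 keep = ch not in "@#"
--             word.append(ch)
--     if word and keep:
--         words.append("".join(word))
--     return " ".join(words)
-- ===== Notes on version B (the rewrite author's own statement) =====
-- stated objective: alternative
-- what changed: B is a single-pass character-level state machine with an explicit word accumulator and a keep flag (punctuation other than @/# and whitespace end the word, which is emitted unless it started with @/#), replacing A's ~30 successive text.replace passes followed by split() and a word loop.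
import Mathlib
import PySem

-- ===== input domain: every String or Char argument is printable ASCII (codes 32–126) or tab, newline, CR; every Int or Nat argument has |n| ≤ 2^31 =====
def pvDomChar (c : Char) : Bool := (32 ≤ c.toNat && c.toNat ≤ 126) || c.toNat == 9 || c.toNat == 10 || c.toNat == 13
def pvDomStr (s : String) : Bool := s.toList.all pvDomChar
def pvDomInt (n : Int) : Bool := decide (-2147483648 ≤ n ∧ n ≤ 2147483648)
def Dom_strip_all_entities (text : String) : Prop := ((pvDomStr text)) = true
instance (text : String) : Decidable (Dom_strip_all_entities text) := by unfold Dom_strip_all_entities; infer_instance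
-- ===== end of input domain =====

-- B replaces A's ~30 replace passes + split() by one character-level state-machine pass; return values proved equal.

-- string.punctuation (stdlib constant both implementations import)
def pyPunctuation : List Char := "!\"#$%&'()*+,-./:;<=>?@[\\]^_`{|}~".toList

-- ===== PORT A =====
def strip_all_entities (text : String) : String :=
  let entityPrefixes : List Char := ['@', '#']
  -- for separator in string.punctuation: if separator not in entity_prefixes: text = text.replace(separator, " ")
  let t : List Char := pyPunctuation.foldl
    (fun s sep => if sep ∈ entityPrefixes then s else PySem.Chars.replace s [sep] [' ']) text.toList
  -- words = []; for word in text.split(): word = word.strip(); if word: if word[0] not in entity_prefixes: words.append(word)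
  let words : List (List Char) := (PySem.Chars.split₀ t).foldl
    (fun ws word =>
      let w := PySem.Chars.strip word
      if w.isEmpty then ws
      else if PySem.List.pyGetD w 0 ' ' ∈ entityPrefixes then ws  -- word[0]; in range since w ≠ []
      else ws ++ [w]) []
  String.ofList (PySem.Chars.join [' '] words)

-- ===== PORT B =====
def strip_all_entities_alt (text : String) : String :=
  -- seps = {c for c in string.punctuation if c not in "@#"}
  let seps : PySem.Set Char := PySem.Set.ofList (pyPunctuation.filter (fun c => !decide (c ∈ (['@', '#'] : List Char))))
  -- for ch in text: … (state: words, word, keep)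
  let st : List (List Char) × List Char × Bool := text.toList.foldl
    (fun (st : List (List Char) × List Char × Bool) ch =>
      let (words, word, keep) := st
      if decide (ch ∈ seps) || PySem.Chars.isspace ch then
        ((if !word.isEmpty && keep then words ++ [word] else words), [], keep)
      else
        (words, word ++ [ch],
          if word.isEmpty then !decide (ch ∈ (['@', '#'] : List Char)) else keep))
    ([], [], true)
  -- if word and keep: words.append("".join(word)); return " ".join(words)
  String.ofList (PySem.Chars.join [' ']
    (if !st.2.1.isEmpty && st.2.2 then st.1 ++ [st.2.1] else st.1))

-- ===== PRECONDITION & SPEC =====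
def Spec_strip_all_entities (text : String) (out : String) : Prop := out = strip_all_entities_alt text
instance (text : String) (out : String) : Decidable (Spec_strip_all_entities text out) := by unfold Spec_strip_all_entities; infer_instance

-- ===== CLAIM (what is proved, stated in full; the proofs are below) =====
def Claim_equal_strip_all_entities : Prop := ∀ (text : String), Dom_strip_all_entities text → Spec_strip_all_entities text (strip_all_entities text)

-- ===== LEMMAS AND PROOFS =====

-- abbreviations used only by the proofs
def pvP : List Char := pyPunctuation.filter (fun c => !decide (c ∈ (['@', '#'] : List Char)))
def pvF (x : Char) : Char := if x ∈ pvP then ' ' else x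
def pvGood (w : List Char) : Bool := !decide (PySem.List.pyGetD w 0 ' ' ∈ (['@', '#'] : List Char))

-- replacing a single character by ' ' is a character map
theorem replace_go_single (c : Char) (l : List Char) : ∀ (fuel : Nat) (acc : List Char), l.length ≤ fuel →
    PySem.Chars.replace.go [c] [' '] fuel l acc
      = acc.reverse ++ l.map (fun x => if x = c then ' ' else x) := by
  induction l with
  | nil => intro fuel acc h; cases fuel <;> simp [PySem.Chars.replace.go]
  | cons x t ih =>
    intro fuel acc h
    cases fuel with
    | zero => simp at h
    | succ f =>
      simp only [PySem.Chars.replace.go, List.isPrefixOf]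
      by_cases hx : x = c
      · subst hx
        simp only [BEq.rfl, Bool.true_and, if_pos, List.length_cons, List.length_nil,
          List.drop_succ_cons, List.drop_zero]
        rw [ih f ([' '].reverse ++ acc) (by simpa using h)]
        simp
      · rw [if_neg (by simp; exact Ne.symm hx)]
        rw [ih f (x :: acc) (by simpa using h)]
        simp [hx]

theorem replace_single (s : List Char) (c : Char) :
    PySem.Chars.replace s [c] [' '] = s.map (fun x => if x = c then ' ' else x) := by
  simp [PySem.Chars.replace]
  simpa using replace_go_single c s s.length [] le_rfl

-- a chain of single-char replacements over Q is one map, provided ' ' ∉ Q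
theorem foldl_replace : ∀ (Q : List Char) (s : List Char), ' ' ∉ Q →
    Q.foldl (fun s c => PySem.Chars.replace s [c] [' ']) s
      = s.map (fun x => if x ∈ Q then ' ' else x) := by
  intro Q
  induction Q with
  | nil => intro s _; simp
  | cons c Q' ih =>
    intro s hs
    simp only [List.foldl_cons]
    rw [replace_single, ih _ (fun h => hs (List.mem_cons_of_mem _ h)), List.map_map]
    refine List.map_congr_left (fun x _ => ?_)
    simp only [Function.comp]
    by_cases hx : x = c
    · subst hx
      have : ' ' ∉ Q' := fun h => hs (List.mem_cons_of_mem _ h)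
      simp [this]
    · simp [hx]

-- A's guarded loop over string.punctuation is a plain loop over the filtered list
theorem foldl_skip (f : List Char → Char → List Char) : ∀ (Q : List Char) (s : List Char),
    Q.foldl (fun s c => if c ∈ (['@', '#'] : List Char) then s else f s c) s
      = (Q.filter (fun c => !decide (c ∈ (['@', '#'] : List Char)))).foldl f s := by
  intro Q
  induction Q with
  | nil => intro s; rfl
  | cons c Q' ih =>
    intro s
    simp only [List.foldl_cons, List.filter_cons]
    by_cases hc : c ∈ (['@', '#'] : List Char)
    · rw [if_pos hc, ih]
      have hb : (!decide (c ∈ (['@', '#'] : List Char))) = false := by simp [hc]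
      rw [hb]
      simp only [Bool.false_eq_true, if_false]
    · rw [if_neg hc, ih]
      have hb : (!decide (c ∈ (['@', '#'] : List Char))) = true := by simp [hc]
      rw [hb]
      simp only [if_true]
      rw [List.foldl_cons]

-- every word produced by split₀ is nonempty and whitespace-free
theorem split₀_go_words : ∀ (s cur : List Char) (acc : List (List Char)),
    (∀ c ∈ cur, PySem.Chars.isspace c = false) →
    (∀ w ∈ acc, w ≠ [] ∧ ∀ c ∈ w, PySem.Chars.isspace c = false) →
    ∀ w ∈ PySem.Chars.split₀.go s cur acc, w ≠ [] ∧ ∀ c ∈ w, PySem.Chars.isspace c = false := by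
  intro s
  induction s with
  | nil =>
    intro cur acc hcur hacc w hw
    simp only [PySem.Chars.split₀.go] at hw
    by_cases hc : cur.isEmpty
    · simp [hc] at hw; exact hacc w (by simpa using hw)
    · simp [hc] at hw
      rcases hw with hw | hw
      · exact hacc w hw
      · subst hw
        refine ⟨by simpa [List.isEmpty_iff] using hc, ?_⟩
        intro c hcw; exact hcur c (by simpa using hcw)
  | cons c rest ih =>
    intro cur acc hcur hacc w hw
    simp only [PySem.Chars.split₀.go] at hw
    by_cases hsp : PySem.Chars.isspace c = true
    · by_cases hc : cur.isEmpty
      · simp [hsp, hc] at hw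
        exact ih [] acc (by simp) hacc w hw
      · simp [hsp, hc] at hw
        refine ih [] (cur.reverse :: acc) (by simp) ?_ w hw
        intro v hv
        rcases List.mem_cons.mp hv with hv | hv
        · subst hv
          exact ⟨by simpa [List.isEmpty_iff] using hc, fun d hd => hcur d (by simpa using hd)⟩
        · exact hacc v hv
    · simp only [hsp] at hw
      simp at hsp
      refine ih (c :: cur) acc ?_ hacc w (by simpa [hsp] using hw)
      intro d hd
      rcases List.mem_cons.mp hd with hd | hd
      · subst hd; exact hsp
      · exact hcur d hd

theorem split₀_words (s : List Char) :
    ∀ w ∈ PySem.Chars.split₀ s, w ≠ [] ∧ ∀ c ∈ w, PySem.Chars.isspace c = false := by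
  exact split₀_go_words s [] [] (by simp) (by simp)

theorem strip_of_nospace (w : List Char) (h : ∀ c ∈ w, PySem.Chars.isspace c = false) :
    PySem.Chars.strip w = w := by
  have h1 : List.dropWhile PySem.Chars.isspace w = w := by
    cases w with
    | nil => rfl
    | cons a t => simp [h a (by simp)]
  have h2 : List.dropWhile PySem.Chars.isspace w.reverse = w.reverse := by
    cases hrev : w.reverse with
    | nil => rfl
    | cons a t =>
      have ha : a ∈ w := List.mem_reverse.mp (by rw [hrev]; simp)
      simp [h a ha]
  simp [PySem.Chars.strip, PySem.Chars.lstrip, PySem.Chars.rstrip, h1, h2]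

-- A's value in closed form: one character map, split, filter
theorem portA_eq (text : String) :
    strip_all_entities text
      = String.ofList (PySem.Chars.join [' ']
          ((PySem.Chars.split₀ (text.toList.map pvF)).filter pvGood)) := by
  unfold strip_all_entities
  simp only []
  have hP : ' ' ∉ pvP := by decide
  rw [foldl_skip]
  rw [show List.filter (fun c => !decide (c ∈ (['@', '#'] : List Char))) pyPunctuation = pvP from rfl]
  rw [foldl_replace _ _ hP]
  rw [show (fun x => if x ∈ pvP then ' ' else x) = pvF from rfl]
  have hwords := split₀_words (text.toList.map pvF)
  rw [PySem.List.foldl_congr_mem _ _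
    (fun ws word => if pvGood word = true then ws ++ [id word] else ws) []
    (by
      intro acc w hwmem
      obtain ⟨hne, hns⟩ := hwords w hwmem
      simp only [strip_of_nospace w hns]
      rw [if_neg (by simpa [List.isEmpty_iff] using hne)]
      unfold pvGood
      by_cases hm : PySem.List.pyGetD w 0 ' ' ∈ (['@', '#'] : List Char)
      · simp [hm]
      · simp [hm])]
  rw [PySem.List.foldl_append_if pvGood id _ []]
  simp

-- accumulator lemma for split₀.go
theorem split₀_go_acc : ∀ (s cur : List Char) (acc : List (List Char)),
    PySem.Chars.split₀.go s cur acc = acc.reverse ++ PySem.Chars.split₀.go s cur [] := by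
  intro s
  induction s with
  | nil =>
    intro cur acc
    by_cases hc : cur.isEmpty <;> simp [PySem.Chars.split₀.go, hc]
  | cons c rest ih =>
    intro cur acc
    simp only [PySem.Chars.split₀.go]
    by_cases hsp : PySem.Chars.isspace c = true
    · by_cases hc : cur.isEmpty
      · simp only [hsp, hc, if_true]
        exact ih [] acc
      · simp only [hsp, hc, if_true, Bool.false_eq_true, if_false]
        rw [ih [] (cur.reverse :: acc), ih [] [cur.reverse]]
        simp
    · simp only [hsp, Bool.false_eq_true, if_false]
      exact ih (c :: cur) acc

-- no character of the kept punctuation set is whitespace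
theorem pvP_nospace : ∀ c ∈ pvP, PySem.Chars.isspace c = false := by
  have h : pvP.all (fun c => !PySem.Chars.isspace c) = true := by rfl
  intro c hc
  simpa using List.all_eq_true.mp h c hc

theorem pvGood_cons (a : Char) (t : List Char) :
    pvGood (a :: t) = (!decide (a ∈ (['@', '#'] : List Char))) := by
  have h : PySem.List.pyGetD (a :: t) 0 ' ' = a := by
    simp [PySem.List.pyGetD, PySem.List.pyGet?, PySem.List.pyIdx?]
  simp [pvGood, h]

-- the first character of a word is unchanged by appending
theorem pvGood_append (w : List Char) (c : Char) (h : w ≠ []) :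
    pvGood (w ++ [c]) = pvGood w := by
  cases w with
  | nil => exact absurd rfl h
  | cons a t =>
    rw [List.cons_append, pvGood_cons, pvGood_cons]

-- B's step function, named for the induction
def pvStep (st : List (List Char) × List Char × Bool) (ch : Char) :
    List (List Char) × List Char × Bool :=
  let (words, word, keep) := st
  if decide (ch ∈ PySem.Set.ofList pvP) || PySem.Chars.isspace ch then
    ((if !word.isEmpty && keep then words ++ [word] else words), [], keep)
  else
    (words, word ++ [ch],
      if word.isEmpty then !decide (ch ∈ (['@', '#'] : List Char)) else keep)

theorem mem_set_pvP (c : Char) : decide (c ∈ PySem.Set.ofList pvP) = decide (c ∈ pvP) := by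
  simp [PySem.Set.mem_ofList]

-- main invariant: B's scan from (out, cur, keep) computes out ++ filtered words of cur ++ s
theorem scan_eq : ∀ (s : List Char) (out : List (List Char)) (cur : List Char) (keep : Bool),
    (cur ≠ [] → keep = pvGood cur) →
    (let st := s.foldl pvStep (out, cur, keep)
     if !st.2.1.isEmpty && st.2.2 then st.1 ++ [st.2.1] else st.1)
      = out ++ (PySem.Chars.split₀.go (s.map pvF) cur.reverse []).filter pvGood := by
  intro s
  induction s with
  | nil =>
    intro out cur keep hkeep
    simp only [List.map_nil, List.foldl_nil, PySem.Chars.split₀.go]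
    cases cur with
    | nil => simp
    | cons a t =>
      have hk := hkeep (by simp)
      simp only [List.isEmpty_cons, Bool.not_false, Bool.true_and, hk]
      by_cases hg : pvGood (a :: t) = true <;> simp [hg]
  | cons c rest ih =>
    intro out cur keep hkeep
    simp only [List.map_cons, List.foldl_cons, PySem.Chars.split₀.go]
    by_cases hsep : (decide (c ∈ PySem.Set.ofList pvP) || PySem.Chars.isspace c) = true
    · -- separator character
      have hspF : PySem.Chars.isspace (pvF c) = true := by
        rcases Bool.or_eq_true_iff.mp hsep with h | h
        · rw [mem_set_pvP] at h
          unfold pvF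
          rw [if_pos (of_decide_eq_true h)]; decide
        · have hcP : c ∉ pvP := by
            intro hc
            rw [pvP_nospace c hc] at h; exact Bool.false_ne_true h
          unfold pvF
          rw [if_neg hcP]; exact h
      rw [hspF]
      simp only [if_true]
      have hstep : pvStep (out, cur, keep) c
          = ((if !cur.isEmpty && keep then out ++ [cur] else out), [], keep) := by
        simp only [pvStep]
        rw [if_pos hsep]
      rw [hstep]
      rw [ih _ [] keep (by intro h; exact absurd rfl h)]
      cases cur with
      | nil => simp
      | cons a t =>
        have hk := hkeep (by simp)
        simp only [List.isEmpty_cons, Bool.not_false, Bool.true_and, List.isEmpty_iff]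
        rw [split₀_go_acc _ [] [List.reverse (a :: t) |>.reverse]]
        simp only [List.reverse_cons, List.reverse_nil, List.nil_append]
        rw [hk]
        by_cases hg : pvGood (a :: t) = true <;> simp [hg]
    · -- word character
      have hcP : c ∉ pvP := by
        intro hc
        exact hsep (by rw [Bool.or_eq_true_iff]; left; rw [mem_set_pvP]; exact decide_eq_true hc)
      have hsp : PySem.Chars.isspace c = false := by
        rcases Bool.eq_false_or_eq_true (PySem.Chars.isspace c) with h | h
        · exact absurd (by rw [Bool.or_eq_true_iff]; right; exact h) hsep
        · exact h
      have hfc : pvF c = c := by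
        unfold pvF; rw [if_neg hcP]
      have hne : PySem.Chars.isspace (pvF c) = false := by rw [hfc]; exact hsp
      rw [hne]
      simp only [Bool.false_eq_true, if_false]
      have hstep : pvStep (out, cur, keep) c
          = (out, cur ++ [c],
              if cur.isEmpty then !decide (c ∈ (['@', '#'] : List Char)) else keep) := by
        simp only [pvStep]
        rw [if_neg hsep]
      rw [hstep]
      have hrev : pvF c :: cur.reverse = (cur ++ [c]).reverse := by
        simp [hfc]
      rw [hrev]
      apply ih
      intro _
      cases cur with
      | nil =>
        simp [pvGood_cons]
      | cons a t =>
        simp only [List.isEmpty_cons, Bool.false_eq_true, if_false]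
        rw [pvGood_append _ _ (by simp)]
        exact hkeep (by simp)

-- ===== VERDICT (by name: the statement is the Claim_ definition above) =====
theorem strip_all_entities_spec : Claim_equal_strip_all_entities := by
  intro text _
  unfold Spec_strip_all_entities
  rw [portA_eq]
  unfold strip_all_entities_alt
  simp only []
  have h := scan_eq text.toList [] [] true (by intro h; exact absurd rfl h)
  simp only [List.reverse_nil] at h
  rw [show (PySem.Set.ofList (pyPunctuation.filter (fun c => !decide (c ∈ (['@', '#'] : List Char))))) = PySem.Set.ofList pvP from rfl]
  rw [show (fun (st : List (List Char) × List Char × Bool) ch =>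
        if decide (ch ∈ PySem.Set.ofList pvP) || PySem.Chars.isspace ch then
          ((if !st.2.1.isEmpty && st.2.2 then st.1 ++ [st.2.1] else st.1), ([] : List Char), st.2.2)
        else
          (st.1, st.2.1 ++ [ch],
            if st.2.1.isEmpty then !decide (ch ∈ (['@', '#'] : List Char)) else st.2.2)) = pvStep from by
    funext st ch; cases st with | mk a b => cases b with | mk w k => simp [pvStep]]
  rw [h]
  simp [PySem.Chars.split₀]
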